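-- pv_equiv track=rewrite | github.com/Th3Lourde/l33tcode | 220_contains_duplicate.py | containsNearbyAlmostDuplicate_1
-- ===== SOURCE A (Python) =====
-- def containsNearbyAlmostDuplicate_1(nums, k, t):
--
--     if t < 0:
--         return False
--
--     # elif t == 0:
--     #     for i in range(len(nums)):
--     #         if abs(nums[i]-nums[i]) <= k:
--     #             return True
--
--     elif t > 0:
--         for i in range(len(nums)-1):
--
--             for j in range(i+1, len(nums)):
--
--                 if (abs(nums[i]-nums[j]) <= t) and (abs(i-j) <= k):
--                     return True
--
--                 elif not(abs(i-j) <= k):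
--                     break
--
--     return False
-- ===== SOURCE B (Python) =====
-- def containsNearbyAlmostDuplicate_1(nums, k, t):
--     if t < 0:
--         return False
--     # diagonal traversal: for each offset d in 1..min(k, len-1),
--     # compare each element with the one d positions later
--     return any(abs(a - b) <= t
--                for d in range(1, min(k, len(nums) - 1) + 1)
--                for a, b in zip(nums, nums[d:]))
-- ===== Notes on version B (the rewrite author's own statement) =====
-- stated objective: alternative
-- what changed: B replaces A's index-based row-by-row nested loops with early break by a diagonal traversal: for each offset d in 1..min(k, len-1) it scans zip(nums, nums[d:]) with a single any(), and B handles t == 0 correctly where A's t == 0 branch is commented out.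
-- intended difference: When t == 0 and the list contains two equal elements at most k indices apart, A returns False (its t == 0 branch is commented out) while B returns True, which is the intended answer to 'is there a nearby pair with |difference| <= t'. — e.g. on containsNearbyAlmostDuplicate_1([1, 1], 1, 0): A returns false, B returns true
import Mathlib
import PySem

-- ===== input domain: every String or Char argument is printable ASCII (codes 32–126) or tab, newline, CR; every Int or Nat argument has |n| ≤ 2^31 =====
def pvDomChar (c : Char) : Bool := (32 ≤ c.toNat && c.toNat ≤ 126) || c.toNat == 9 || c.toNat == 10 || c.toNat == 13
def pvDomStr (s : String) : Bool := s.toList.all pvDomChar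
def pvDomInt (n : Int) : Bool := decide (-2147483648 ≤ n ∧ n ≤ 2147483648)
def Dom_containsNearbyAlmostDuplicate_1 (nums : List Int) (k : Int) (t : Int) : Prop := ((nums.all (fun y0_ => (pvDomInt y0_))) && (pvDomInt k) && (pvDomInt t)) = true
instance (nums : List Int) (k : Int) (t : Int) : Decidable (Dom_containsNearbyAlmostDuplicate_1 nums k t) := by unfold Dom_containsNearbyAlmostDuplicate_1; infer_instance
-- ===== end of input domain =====

-- B replaces A's index-based nested loops (inner break at window edge) by a diagonal
-- traversal over offsets d = 1..min(k, len-1) zipping the list with its d-shift; B also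
-- answers the t = 0 case correctly, where A's commented-out branch always returns False (see D_).

-- ===== PORT A =====
-- inner 'for j in range(i+1, len(nums))' with 'return True' / 'break'
def pvInnerA (nums : List Int) (k t : Int) (i : Int) : List Int → Bool
  | [] => false
  | j :: rest =>
    if |PySem.List.pyGetD nums i 0 - PySem.List.pyGetD nums j 0| ≤ t ∧ |i - j| ≤ k then true
    else if ¬(|i - j| ≤ k) then false
    else pvInnerA nums k t i rest

-- outer 'for i in range(len(nums)-1)' with early 'return True'
def pvOuterA (nums : List Int) (k t : Int) : List Int → Bool
  | [] => false
  | i :: rest =>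
    if pvInnerA nums k t i (PySem.List.pyRange (i + 1) (nums.length : Int) 1) then true
    else pvOuterA nums k t rest

def containsNearbyAlmostDuplicate_1 (nums : List Int) (k : Int) (t : Int) : Bool :=
  if t < 0 then false
  else if t > 0 then
    pvOuterA nums k t (PySem.List.pyRange 0 ((nums.length : Int) - 1) 1)
  else false

-- ===== PORT B =====
def containsNearbyAlmostDuplicate_1_alt (nums : List Int) (k : Int) (t : Int) : Bool :=
  if t < 0 then false
  else
    (PySem.List.pyRange 1 (min k ((nums.length : Int) - 1) + 1) 1).any (fun d =>
      (nums.zip (PySem.List.slice nums (some d) none)).any (fun ab =>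
        decide (|ab.1 - ab.2| ≤ t)))

-- ===== PRECONDITION & SPEC =====
-- closed-form description of 'some pair at distance ≤ k has |difference| ≤ t' (used only by D_)
def pvWindowPair (nums : List Int) (k t : Int) : Bool :=
  (List.range nums.length).any (fun j => (List.range j).any (fun i =>
    decide (((j : Int) - (i : Int) ≤ k) ∧ |nums.getD i 0 - nums.getD j 0| ≤ t)))

-- When t = 0 and two equal elements lie at most k indices apart, A returns false (its
-- t == 0 branch is commented out) while B returns true, the intended answer.
def D_containsNearbyAlmostDuplicate_1 (nums : List Int) (k : Int) (t : Int) : Prop :=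
  t = 0 ∧ pvWindowPair nums k 0 = true
instance (nums : List Int) (k : Int) (t : Int) : Decidable (D_containsNearbyAlmostDuplicate_1 nums k t) := by
  unfold D_containsNearbyAlmostDuplicate_1; infer_instance

def Spec_containsNearbyAlmostDuplicate_1 (nums : List Int) (k : Int) (t : Int) (out : Bool) : Prop :=
  ¬ D_containsNearbyAlmostDuplicate_1 nums k t → out = containsNearbyAlmostDuplicate_1_alt nums k t
instance (nums : List Int) (k : Int) (t : Int) (out : Bool) : Decidable (Spec_containsNearbyAlmostDuplicate_1 nums k t out) := by
  unfold Spec_containsNearbyAlmostDuplicate_1; infer_instance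

def pvDiffWitness_containsNearbyAlmostDuplicate_1 : List Int × Int × Int := ([1, 1], 1, 0)
def pvDiffWitnessOut_containsNearbyAlmostDuplicate_1 : Bool × Bool := (false, true)

-- ===== CLAIM (what is proved, stated in full; the proofs are below) =====
def Claim_unchanged_containsNearbyAlmostDuplicate_1 : Prop := ∀ (nums : List Int) (k : Int) (t : Int), Dom_containsNearbyAlmostDuplicate_1 nums k t → Spec_containsNearbyAlmostDuplicate_1 nums k t (containsNearbyAlmostDuplicate_1 nums k t)
def Claim_changed_containsNearbyAlmostDuplicate_1 : Prop := Dom_containsNearbyAlmostDuplicate_1 (pvDiffWitness_containsNearbyAlmostDuplicate_1.1) (pvDiffWitness_containsNearbyAlmostDuplicate_1.2.1) (pvDiffWitness_containsNearbyAlmostDuplicate_1.2.2) ∧ D_containsNearbyAlmostDuplicate_1 (pvDiffWitness_containsNearbyAlmostDuplicate_1.1) (pvDiffWitness_containsNearbyAlmostDuplicate_1.2.1) (pvDiffWitness_containsNearbyAlmostDuplicate_1.2.2) ∧ containsNearbyAlmostDuplicate_1 (pvDiffWitness_containsNearbyAlmostDuplicate_1.1) (pvDiffWitness_containsNearbyAlmostDuplicate_1.2.1)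 (pvDiffWitness_containsNearbyAlmostDuplicate_1.2.2) = pvDiffWitnessOut_containsNearbyAlmostDuplicate_1.1 ∧ containsNearbyAlmostDuplicate_1_alt (pvDiffWitness_containsNearbyAlmostDuplicate_1.1) (pvDiffWitness_containsNearbyAlmostDuplicate_1.2.1) (pvDiffWitness_containsNearbyAlmostDuplicate_1.2.2) = pvDiffWitnessOut_containsNearbyAlmostDuplicate_1.2 ∧ pvDiffWitnessOut_containsNearbyAlmostDuplicate_1.1 ≠ pvDiffWitnessOut_containsNearbyAlmostDuplicate_1.2
def Claim_exact_containsNearbyAlmostDuplicate_1 : Prop := ∀ (nums : List Int) (k : Int) (t : Int), Dom_containsNearbyAlmostDuplicate_1 nums k t → D_containsNearbyAlmostDuplicate_1 nums k t → containsNearbyAlmostDuplicate_1 nums k t ≠ containsNearbyAlmostDuplicate_1_alt nums k t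

-- ===== LEMMAS AND PROOFS =====

theorem pvWindowPair_iff (nums : List Int) (k t : Int) :
    pvWindowPair nums k t = true ↔
      ∃ j, j < nums.length ∧ ∃ i, i < j ∧ ((j : Int) - (i : Int) ≤ k ∧ |nums.getD i 0 - nums.getD j 0| ≤ t) := by
  simp [pvWindowPair, List.any_eq_true, List.mem_range]

theorem pvInnerA_eq_any (nums : List Int) (k t i : Int) :
    ∀ l : List Int, l.Pairwise (· ≤ ·) → (∀ x ∈ l, i ≤ x) →
      pvInnerA nums k t i l = l.any (fun j =>
        decide (|PySem.List.pyGetD nums i 0 - PySem.List.pyGetD nums j 0| ≤ t ∧ |i - j| ≤ k)) := by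
  intro l
  induction l with
  | nil => intro _ _; simp [pvInnerA]
  | cons j rest ih =>
    intro hp hlb
    have hij : i ≤ j := hlb j (by simp)
    have habs : |i - j| = j - i := by
      rw [abs_sub_comm]; exact abs_of_nonneg (by omega)
    by_cases h1 : |PySem.List.pyGetD nums i 0 - PySem.List.pyGetD nums j 0| ≤ t ∧ |i - j| ≤ k
    · simp [pvInnerA, h1]
    · by_cases h2 : |i - j| ≤ k
      · have := ih hp.tail (fun x hx => hlb x (by simp [hx]))
        simp [pvInnerA, h2, this]
      · have hrest : ∀ x ∈ rest,
            ¬ ((decide (|PySem.List.pyGetD nums i 0 - PySem.List.pyGetD nums x 0| ≤ t ∧ |i - x| ≤ k)) = true) := by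
          intro x hx
          have hjx : j ≤ x := (List.pairwise_cons.1 hp).1 x hx
          have hx2 : |i - x| = x - i := by
            rw [abs_sub_comm]; exact abs_of_nonneg (by omega)
          simp only [decide_eq_true_iff, not_and]
          intro _
          omega
        simp only [pvInnerA, if_neg h1, if_pos h2, List.any_cons]
        have h1' : (decide (|PySem.List.pyGetD nums i 0 - PySem.List.pyGetD nums j 0| ≤ t ∧ |i - j| ≤ k)) = false := by
          simpa using h1
        rw [h1', List.any_eq_false.2 hrest]
        simp

theorem pvOuterA_eq_any (nums : List Int) (k t : Int) :
    ∀ l : List Int, pvOuterA nums k t l = l.any (fun i =>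
      pvInnerA nums k t i (PySem.List.pyRange (i + 1) (nums.length : Int) 1)) := by
  intro l
  induction l with
  | nil => simp [pvOuterA]
  | cons i rest ih =>
    by_cases h : pvInnerA nums k t i (PySem.List.pyRange (i + 1) (nums.length : Int) 1) = true
    · simp [pvOuterA, h]
    · simp [pvOuterA, h, ih]

theorem A_eq_pvWindowPair (nums : List Int) (k t : Int) :
    pvOuterA nums k t (PySem.List.pyRange 0 ((nums.length : Int) - 1) 1) = pvWindowPair nums k t := by
  rw [Bool.eq_iff_iff, pvOuterA_eq_any, pvWindowPair_iff, List.any_eq_true]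
  constructor
  · rintro ⟨i, hi, hinner⟩
    rw [PySem.List.mem_pyRange_one] at hi
    rw [pvInnerA_eq_any nums k t i _
        ((PySem.List.pairwise_lt_pyRange_one (i+1) (nums.length : Int)).imp le_of_lt)
        (fun x hx => by
          have := (PySem.List.mem_pyRange_one).1 hx; omega)] at hinner
    rw [List.any_eq_true] at hinner
    obtain ⟨j, hj, hcond⟩ := hinner
    rw [PySem.List.mem_pyRange_one] at hj
    rw [decide_eq_true_iff] at hcond
    have habs : |i - j| = j - i := by
      rw [abs_sub_comm]; exact abs_of_nonneg (by omega)
    have hi' : ((i.toNat : Int)) = i := Int.toNat_of_nonneg (by omega)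
    have hj' : ((j.toNat : Int)) = j := Int.toNat_of_nonneg (by omega)
    have e1 : PySem.List.pyGetD nums i 0 = nums.getD i.toNat 0 := by
      rw [PySem.List.pyGetD_eq_getElem nums 0 (by omega) (by omega),
          List.getD_eq_getElem nums 0 (by omega)]
    have e2 : PySem.List.pyGetD nums j 0 = nums.getD j.toNat 0 := by
      rw [PySem.List.pyGetD_eq_getElem nums 0 (by omega) (by omega),
          List.getD_eq_getElem nums 0 (by omega)]
    refine ⟨j.toNat, by omega, i.toNat, by omega, by omega, ?_⟩
    rw [← e1, ← e2]; exact hcond.1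
  · rintro ⟨j, hj, i, hij, hk, ht⟩
    refine ⟨(i : Int), ?_, ?_⟩
    · rw [PySem.List.mem_pyRange_one]; omega
    · rw [pvInnerA_eq_any nums k t (i : Int) _
          ((PySem.List.pairwise_lt_pyRange_one ((i : Int)+1) (nums.length : Int)).imp le_of_lt)
          (fun x hx => by
            have := (PySem.List.mem_pyRange_one).1 hx; omega)]
      rw [List.any_eq_true]
      refine ⟨(j : Int), ?_, ?_⟩
      · rw [PySem.List.mem_pyRange_one]; omega
      · rw [decide_eq_true_iff]
        have habs : |(i : Int) - (j : Int)| = (j : Int) - (i : Int) := by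
          rw [abs_sub_comm]; exact abs_of_nonneg (by omega)
        refine ⟨?_, by omega⟩
        rw [PySem.List.pyGetD_natCast, PySem.List.pyGetD_natCast]
        exact ht

theorem zip_drop_any (nums : List Int) (f : Int × Int → Bool) (m : Nat) :
    (nums.zip (nums.drop m)).any f = true ↔
      ∃ idx, idx + m < nums.length ∧ f (nums.getD idx 0, nums.getD (idx + m) 0) = true := by
  rw [List.any_eq_true]
  constructor
  · rintro ⟨ab, hab, hf⟩
    rw [List.mem_iff_getElem] at hab
    obtain ⟨idx, hlt, heq⟩ := hab
    have hlen : (nums.zip (nums.drop m)).length = min nums.length (nums.length - m) := by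
      simp [List.length_zip]
    have hidx : idx + m < nums.length := by omega
    refine ⟨idx, hidx, ?_⟩
    have : ab = (nums.getD idx 0, nums.getD (idx + m) 0) := by
      rw [← heq]
      have h1 : idx < nums.length := by omega
      have h2 : idx < (nums.drop m).length := by simp [List.length_drop]; omega
      simp [List.getElem_zip, List.getElem_drop, h1, hidx, Nat.add_comm m idx]
    rw [← this]; exact hf
  · rintro ⟨idx, hidx, hf⟩
    refine ⟨(nums.getD idx 0, nums.getD (idx + m) 0), ?_, hf⟩
    rw [List.mem_iff_getElem]
    have hz : idx < (nums.zip (nums.drop m)).length := by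
      simp [List.length_zip, List.length_drop]; omega
    refine ⟨idx, hz, ?_⟩
    have h1 : idx < nums.length := by omega
    have h2 : idx < (nums.drop m).length := by simp [List.length_drop]; omega
    simp [List.getElem_zip, List.getElem_drop, h1, hidx, Nat.add_comm m idx]

theorem B_eq_pvWindowPair (nums : List Int) (k t : Int) :
    (PySem.List.pyRange 1 (min k ((nums.length : Int) - 1) + 1) 1).any (fun d =>
      (nums.zip (PySem.List.slice nums (some d) none)).any (fun ab =>
        decide (|ab.1 - ab.2| ≤ t))) = pvWindowPair nums k t := by
  rw [Bool.eq_iff_iff, List.any_eq_true, pvWindowPair_iff]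
  constructor
  · rintro ⟨d, hd, hany⟩
    rw [PySem.List.mem_pyRange_one] at hd
    rw [PySem.List.slice_from nums (show (0:Int) ≤ d by omega)] at hany
    rw [zip_drop_any] at hany
    obtain ⟨idx, hidx, hf⟩ := hany
    rw [decide_eq_true_iff] at hf
    refine ⟨idx + d.toNat, hidx, idx, by omega, ?_, hf⟩
    push_cast; omega
  · rintro ⟨j, hj, i, hij, hk, ht⟩
    refine ⟨((j : Int) - (i : Int)), ?_, ?_⟩
    · rw [PySem.List.mem_pyRange_one]; omega
    · rw [PySem.List.slice_from nums (show (0:Int) ≤ (j : Int) - (i : Int) by omega), zip_drop_any]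
      refine ⟨i, ?_, ?_⟩
      · have : ((j : Int) - (i : Int)).toNat = j - i := by omega
        omega
      · rw [decide_eq_true_iff]
        have : i + ((j : Int) - (i : Int)).toNat = j := by omega
        rw [this]; exact ht

theorem A_val (nums : List Int) (k t : Int) :
    containsNearbyAlmostDuplicate_1 nums k t =
      if 0 < t then pvWindowPair nums k t else false := by
  unfold containsNearbyAlmostDuplicate_1
  rcases lt_trichotomy t 0 with h | h | h
  · rw [if_pos h, if_neg (by omega)]
  · subst h; simp
  · rw [if_neg (by omega), if_pos h, if_pos h, A_eq_pvWindowPair]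

theorem B_val (nums : List Int) (k t : Int) :
    containsNearbyAlmostDuplicate_1_alt nums k t =
      if t < 0 then false else pvWindowPair nums k t := by
  unfold containsNearbyAlmostDuplicate_1_alt
  by_cases h : t < 0
  · simp [h]
  · simp [h, B_eq_pvWindowPair]

-- ===== VERDICT (by name: the statement is the Claim_ definition above) =====
theorem containsNearbyAlmostDuplicate_1_spec : Claim_unchanged_containsNearbyAlmostDuplicate_1 := by
  intro nums k t _
  unfold Spec_containsNearbyAlmostDuplicate_1
  intro hD
  rw [A_val, B_val]
  rcases lt_trichotomy t 0 with h | h | h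
  · simp [h]; omega
  · subst h
    simp only [lt_irrefl, if_false]
    have : ¬ pvWindowPair nums k 0 = true := fun hw =>
      hD ⟨rfl, hw⟩
    simp at this
    simp [this]
  · simp [h, not_lt_of_gt h]

theorem containsNearbyAlmostDuplicate_1_changed : Claim_changed_containsNearbyAlmostDuplicate_1 := by
  unfold Claim_changed_containsNearbyAlmostDuplicate_1; decide

theorem containsNearbyAlmostDuplicate_1_tight : Claim_exact_containsNearbyAlmostDuplicate_1 := by
  intro nums k t _ hD
  obtain ⟨ht, hw⟩ := hD
  subst ht
  rw [A_val, B_val, if_neg (lt_irrefl 0), if_neg (lt_irrefl 0), hw]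
  simp
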